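-- pv_equiv track=rewrite | github.com/Rickstaryo/CodingTestPrep | Level0_JavaScript/20230216_compositenumber.py | solution
-- ===== SOURCE A (Python) =====
-- def solution(n):
--     answer = 0
--     for i in range(4, n+1):
--         if i % 2 == 0 or i % 3 == 0:
--             answer += 1
--     return answer
--
--     # Critically wrong to build what ? because it need another for to search
--     def solution(n):
--         answer = 0
--         for i in range(4, n+1):
--             for j in range(2, int(i**0.5)+1):
--                 if i % j == 0:
--                     answer += 1
--                     break
--         return answer
-- ===== SOURCE B (Python) =====
-- def solution(n):
--     # inclusion-exclusion closed form over [4, n]: multiples of 2 + multiples of 3 - multiples of 6,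
--     # minus the qualifying numbers below 4 (2 and 3)
--     if n < 4:
--         return 0
--     return n // 2 + n // 3 - n // 6 - 2
-- ===== Notes on version B (the rewrite author's own statement) =====
-- stated objective: faster
-- what changed: Replaced the O(n) loop over range(4, n+1) by an O(1) inclusion-exclusion closed form n//2 + n//3 - n//6 - 2.
import Mathlib
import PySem

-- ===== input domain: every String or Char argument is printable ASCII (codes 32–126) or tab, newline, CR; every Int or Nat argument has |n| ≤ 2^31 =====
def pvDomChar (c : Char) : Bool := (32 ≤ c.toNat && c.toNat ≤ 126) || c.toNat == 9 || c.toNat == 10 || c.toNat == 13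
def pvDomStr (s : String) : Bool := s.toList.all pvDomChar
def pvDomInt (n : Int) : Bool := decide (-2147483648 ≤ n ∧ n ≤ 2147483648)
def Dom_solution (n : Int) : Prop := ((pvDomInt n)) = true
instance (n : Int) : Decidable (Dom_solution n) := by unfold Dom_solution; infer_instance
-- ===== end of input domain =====

-- B replaces A's O(n) loop by an O(1) inclusion-exclusion closed form (asymptotically faster).
-- ===== PORT A =====
def solution (n : Int) : Int :=
  (PySem.List.pyRange 4 (n + 1) 1).foldl
    (fun answer i =>
      if PySem.Int.mod i 2 == 0 || PySem.Int.mod i 3 == 0 then answer + 1 else answer) 0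

-- ===== PORT B =====
def solution_alt (n : Int) : Int :=
  if n < 4 then 0
  else PySem.Int.floordiv n 2 + PySem.Int.floordiv n 3 - PySem.Int.floordiv n 6 - 2

-- ===== PRECONDITION & SPEC =====
def Spec_solution (n : Int) (out : Int) : Prop := out = solution_alt n
instance (n : Int) (out : Int) : Decidable (Spec_solution n out) := by unfold Spec_solution; infer_instance

-- ===== CLAIM (what is proved, stated in full; the proofs are below) =====
def Claim_equal_solution : Prop := ∀ (n : Int), Dom_solution n → Spec_solution n (solution n)

-- ===== LEMMAS AND PROOFS =====

-- ===== VERDICT (by name: the statement is the Claim_ definition above) =====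
lemma solA_step (n : Int) (h : 4 ≤ n) :
    solution n = solution (n - 1)
      + (if PySem.Int.mod n 2 == 0 || PySem.Int.mod n 3 == 0 then (1 : Int) else 0) := by
  unfold solution
  have hn : n - 1 + 1 = n := by ring
  rw [hn, PySem.List.pyRange_one_succ_right (show (4:Int) ≤ n by omega), List.foldl_append]
  simp only [List.foldl_cons, List.foldl_nil]
  split <;> ring

lemma solAlt_step (n : Int) (h : 4 ≤ n) :
    solution_alt n = solution_alt (n - 1)
      + (if PySem.Int.mod n 2 == 0 || PySem.Int.mod n 3 == 0 then (1 : Int) else 0) := by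
  unfold solution_alt
  simp only [PySem.Int.floordiv_eq_ediv_of_pos (show (0:Int) < 2 by norm_num),
             PySem.Int.floordiv_eq_ediv_of_pos (show (0:Int) < 3 by norm_num),
             PySem.Int.floordiv_eq_ediv_of_pos (show (0:Int) < 6 by norm_num),
             PySem.Int.mod_eq_emod_of_pos (show (0:Int) < 2 by norm_num),
             PySem.Int.mod_eq_emod_of_pos (show (0:Int) < 3 by norm_num),
             beq_iff_eq, Bool.or_eq_true]
  rw [if_neg (not_lt.mpr (show (4:Int) ≤ n from h))]
  by_cases h4 : n = 4
  · subst h4; norm_num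
  · rw [if_neg (show ¬ n - 1 < 4 by omega)]
    have h6 : n % 6 = 0 ∨ n % 6 = 1 ∨ n % 6 = 2 ∨ n % 6 = 3 ∨ n % 6 = 4 ∨ n % 6 = 5 := by
      omega
    by_cases hc : n % 2 = 0 ∨ n % 3 = 0
    · rw [if_pos hc]
      rcases hc with hc | hc <;> rcases h6 with h6|h6|h6|h6|h6|h6 <;> omega
    · rw [if_neg hc]
      have h2 : n % 2 ≠ 0 := fun q => hc (Or.inl q)
      have h3 : n % 3 ≠ 0 := fun q => hc (Or.inr q)
      rcases h6 with h6|h6|h6|h6|h6|h6 <;> omega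

lemma sol_eq_alt (n : Int) : solution n = solution_alt n := by
  by_cases h : n < 4
  · unfold solution solution_alt
    rw [PySem.List.pyRange_one_eq_nil (show n + 1 ≤ 4 by omega), if_pos h]
    rfl
  · rw [not_lt] at h
    obtain ⟨k, hk⟩ : ∃ k : Nat, n = 3 + (k + 1) := ⟨(n - 4).toNat, by omega⟩
    subst hk
    clear h
    induction k with
    | zero =>
      show solution 4 = solution_alt 4
      decide
    | succ m ih =>
      have h4 : (4 : Int) ≤ 3 + (↑(m + 1) + 1) := by push_cast; omega
      rw [solA_step _ h4, solAlt_step _ h4]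
      congr 1
      have h3 : (3 : Int) + (↑(m + 1) + 1) - 1 = 3 + (↑m + 1) := by push_cast; ring
      rw [h3, ih]

theorem solution_spec : Claim_equal_solution := by
  intro n _
  unfold Spec_solution
  exact sol_eq_alt n
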